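-- pv_equiv track=rewrite | github.com/terenceang/TN9K-DVI_HDMI | read_waveform.py | calculate_bch_ecc
-- ===== SOURCE A (Python) =====
-- def calculate_bch_ecc(hb0: int, hb1: int, hb2: int) -> int:
--     """
--     Calculate BCH(31,24) ECC used by HDMI packets.
--     Generator polynomial: x^7 + x^3 + x^2 + 1 (0x8D with implied x^7 term)
--     """
--     data = ((hb0 & 0xFF) << 16) | ((hb1 & 0xFF) << 8) | (hb2 & 0xFF)
--     poly = 0x8D
--     degree = 7
--     lfsr = 0
--
--     for i in range(23, -1, -1):
--         bit = (data >> i) & 1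
--         feedback = bit ^ ((lfsr >> (degree - 1)) & 1)
--         lfsr = (lfsr << 1) & ((1 << degree) - 1)
--         if feedback:
--             lfsr ^= 0x0D
--
--     return lfsr & 0x7F
-- ===== SOURCE B (Python) =====
-- def calculate_bch_ecc(hb0: int, hb1: int, hb2: int) -> int:
--     """
--     BCH(31,24) ECC via GF(2) polynomial long division: append 7 zero bits to
--     the packed 24-bit header, then XOR the full generator 0x8D (x^7+x^3+x^2+1)
--     under each set leading bit from position 30 down to 7; the 7 low bits that
--     remain are the remainder.
--     """
--     n = (((hb0 & 0xFF) << 16) | ((hb1 & 0xFF) << 8) | (hb2 & 0xFF)) << 7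
--     for i in range(30, 6, -1):
--         if (n >> i) & 1:
--             n ^= 0x8D << (i - 7)
--     return n & 0x7F
-- ===== Notes on version B (the rewrite author's own statement) =====
-- stated objective: alternative
-- what changed: Replaces the 7-bit LFSR register with shift/feedback state by GF(2) polynomial long division on the whole 31-bit dividend (data << 7), XORing the full generator 0x8D under each set leading bit and returning the low 7 bits.
import Mathlib
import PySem

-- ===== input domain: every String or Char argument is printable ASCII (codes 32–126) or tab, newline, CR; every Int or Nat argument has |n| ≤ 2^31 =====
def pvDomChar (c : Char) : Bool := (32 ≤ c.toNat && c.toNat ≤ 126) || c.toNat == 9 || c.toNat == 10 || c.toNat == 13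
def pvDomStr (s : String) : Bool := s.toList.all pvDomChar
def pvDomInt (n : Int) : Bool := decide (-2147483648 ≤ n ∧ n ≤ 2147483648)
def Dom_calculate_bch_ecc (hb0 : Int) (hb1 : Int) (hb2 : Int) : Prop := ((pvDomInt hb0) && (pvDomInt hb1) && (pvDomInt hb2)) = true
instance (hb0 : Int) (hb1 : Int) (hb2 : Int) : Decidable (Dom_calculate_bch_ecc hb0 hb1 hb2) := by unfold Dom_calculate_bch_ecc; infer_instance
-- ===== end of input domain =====

-- B replaces A's LFSR-register ECC by GF(2) polynomial long division on the whole dividend (alternative decomposition, same cost); return values agree on all inputs.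
-- ===== PORT A =====
-- loop body of A's `for i in range(23, -1, -1)` (i is 23..0, so `i.toNat` is exact for Python's `data >> i`)
def pvStepA (data : Int) (lfsr : Int) (i : Int) : Int :=
  let bit := PySem.Int.band (data >>> i.toNat) 1
  let feedback := PySem.Int.bxor bit (PySem.Int.band (lfsr >>> (7 - 1 : Nat)) 1)
  let lfsr := PySem.Int.band (lfsr <<< (1 : Nat)) ((1 <<< (7 : Nat)) - 1)
  if feedback ≠ 0 then PySem.Int.bxor lfsr 0x0D else lfsr

def calculate_bch_ecc (hb0 : Int) (hb1 : Int) (hb2 : Int) : Int :=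
  let data := PySem.Int.bor (PySem.Int.bor ((PySem.Int.band hb0 0xFF) <<< (16 : Nat)) ((PySem.Int.band hb1 0xFF) <<< (8 : Nat))) (PySem.Int.band hb2 0xFF)
  let lfsr : Int := 0
  let lfsr := (PySem.List.pyRange 23 (-1) (-1)).foldl (pvStepA data) lfsr
  PySem.Int.band lfsr 0x7F

-- ===== PORT B =====
-- loop body of B's `for i in range(30, 6, -1)` (i is 30..7, so `i.toNat`, `(i-7).toNat` are exact)
def pvStepB (n : Int) (i : Int) : Int :=
  if PySem.Int.band (n >>> i.toNat) 1 ≠ 0 then PySem.Int.bxor n (0x8D <<< (i - 7).toNat) else n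

def calculate_bch_ecc_alt (hb0 : Int) (hb1 : Int) (hb2 : Int) : Int :=
  let n := (PySem.Int.bor (PySem.Int.bor ((PySem.Int.band hb0 0xFF) <<< (16 : Nat)) ((PySem.Int.band hb1 0xFF) <<< (8 : Nat))) (PySem.Int.band hb2 0xFF)) <<< (7 : Nat)
  let n := (PySem.List.pyRange 30 6 (-1)).foldl pvStepB n
  PySem.Int.band n 0x7F

-- ===== PRECONDITION & SPEC =====
def Spec_calculate_bch_ecc (hb0 : Int) (hb1 : Int) (hb2 : Int) (out : Int) : Prop := out = calculate_bch_ecc_alt hb0 hb1 hb2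
instance (hb0 : Int) (hb1 : Int) (hb2 : Int) (out : Int) : Decidable (Spec_calculate_bch_ecc hb0 hb1 hb2 out) := by unfold Spec_calculate_bch_ecc; infer_instance

-- ===== CLAIM (what is proved, stated in full; the proofs are below) =====
def Claim_equal_calculate_bch_ecc : Prop := ∀ (hb0 : Int) (hb1 : Int) (hb2 : Int), Dom_calculate_bch_ecc hb0 hb1 hb2 → Spec_calculate_bch_ecc hb0 hb1 hb2 (calculate_bch_ecc hb0 hb1 hb2)

-- ===== LEMMAS AND PROOFS =====

-- Nat-level model of A's loop: one LFSR step fed the input bit `b`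
def pvStep (l : Nat) (b : Bool) : Nat :=
  (2 * l % 128) ^^^ (if b.xor (l.testBit 6) then 13 else 0)

-- A's loop over bits n-1..0 of d
def pvRunA : Nat → Nat → Nat → Nat
  | 0, _, l => l
  | n+1, d, l => pvRunA n d (pvStep l (d.testBit n))

-- B's loop over dividend positions n+6..7
def pvRunB : Nat → Nat → Nat
  | 0, nv => nv
  | n+1, nv => pvRunB n (if nv.testBit (n+7) then nv ^^^ (141 <<< n) else nv)

lemma pvBitAndOne (x k : Nat) : x >>> k &&& 1 = (x.testBit k).toNat := by
  rw [Nat.and_one_is_mod, Nat.testBit, Nat.shiftRight_eq_div_pow]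
  rcases Nat.mod_two_eq_zero_or_one (x / 2 ^ k) with h | h <;> simp [h]

lemma pvMask (l : Nat) : (l <<< 1) &&& 127 = 2 * l % 128 := by
  have := Nat.and_two_pow_sub_one_eq_mod (l <<< 1) 7
  norm_num at this
  rw [this, Nat.shiftLeft_eq]; ring_nf

lemma pvStep_lt (l : Nat) (b : Bool) (hl : l < 128) : pvStep l b < 128 := by
  unfold pvStep
  have h1 : 2 * l % 128 < 2 ^ 7 := by omega
  have h2 : (if b.xor (l.testBit 6) then 13 else 0) < 2 ^ 7 := by split <;> norm_num
  simpa using Nat.xor_lt_two_pow h1 h2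

lemma pvRunA_mod : ∀ (n d l : Nat), pvRunA n (d % 2 ^ n) l = pvRunA n d l := by
  intro n
  induction n with
  | zero => intro d l; rfl
  | succ n ih =>
    intro d l
    show pvRunA n (d % 2 ^ (n+1)) (pvStep l ((d % 2 ^ (n+1)).testBit n))
        = pvRunA n d (pvStep l (d.testBit n))
    have hb : (d % 2 ^ (n+1)).testBit n = d.testBit n := by
      simp [Nat.testBit_mod_two_pow]
    rw [hb]
    calc pvRunA n (d % 2 ^ (n+1)) (pvStep l (d.testBit n))
        = pvRunA n (d % 2 ^ (n+1) % 2 ^ n) (pvStep l (d.testBit n)) := (ih _ _).symm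
      _ = pvRunA n (d % 2 ^ n) (pvStep l (d.testBit n)) := by
            rw [Nat.mod_mod_of_dvd _ (pow_dvd_pow 2 (by omega))]
      _ = pvRunA n d (pvStep l (d.testBit n)) := ih _ _

lemma pvHigh (x i : Nat) (b : Nat) (hx : x < 2 ^ b) (hi : b ≤ i) : x.testBit i = false :=
  Nat.testBit_eq_false_of_lt (lt_of_lt_of_le hx (Nat.pow_le_pow_right (by omega) hi))

lemma pvIfBit (f : Bool) (a i : Nat) : (if f then a else 0).testBit i = (f && a.testBit i) := by
  cases f <;> simp

lemma pv141 (t : Nat) (ht : t < 7) : Nat.testBit 141 t = Nat.testBit 13 t := by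
  interval_cases t <;> decide

-- one division step on the dividend = one LFSR step on the 7-bit window
lemma pvKeyAux (n d l : Nat) (f : Bool) (hd : d < 2 ^ (n+1)) (hl : l < 128)
    (hf : f = (d.testBit n).xor (l.testBit 6)) :
    ((d <<< 7) ^^^ (l <<< (n+1))) ^^^ ((if f then 141 else 0) <<< n)
    = ((d % 2 ^ n) <<< 7) ^^^ ((2 * l % 128 ^^^ (if f then 13 else 0)) <<< n) := by
  have h2l : 2 * l % 128 = (l <<< 1) % 2 ^ 7 := by rw [Nat.shiftLeft_eq]; ring_nf
  rw [h2l]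
  apply Nat.eq_of_testBit_eq
  intro j
  simp only [Nat.testBit_xor, Nat.testBit_shiftLeft, Nat.testBit_mod_two_pow, pvIfBit]
  rcases lt_or_ge j n with hj | hj
  · -- below the generator window: only the d bits survive
    have g1 : ¬ (j ≥ n+1) := by omega
    have g2 : ¬ (j ≥ n) := by omega
    by_cases h7 : 7 ≤ j
    · have : j - 7 < n := by omega
      simp [g1, g2, this]
    · simp [g1, g2, h7]
  · rcases lt_or_ge j (n+7) with hj7 | hj7
    · -- inside the 7-bit window
      obtain ⟨t, rfl⟩ : ∃ t, j = n + t := ⟨j - n, by omega⟩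
      have ht : t < 7 := by omega
      have e1 : n + t - n = t := by omega
      have e2 : n + t - (n+1) = t - 1 := by omega
      have g1 : n + t ≥ n := by omega
      rw [e1, e2, pv141 t ht]
      by_cases h7 : 7 ≤ n + t
      · have hlt : n + t - 7 < n := by omega
        simp [h7, hlt, g1, ht, show (n + t ≥ n+1) ↔ (1 ≤ t) by omega]
      · simp [h7, g1, ht, show (n + t ≥ n+1) ↔ (1 ≤ t) by omega]
    · rcases eq_or_lt_of_le hj7 with hj7e | hj7g
      · -- j = n + 7 : the leading generator bit cancels the feedback bit
        have e1 : j - 7 = n := by omega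
        have e2 : j - (n+1) = 6 := by omega
        have e3 : j - n = 7 := by omega
        have g4 : ¬ (j - 7 < n) := by omega
        have g5 : ¬ (j - n < 7) := by omega
        rw [e1, e2, e3]
        subst hf
        have h141 : Nat.testBit 141 7 = true := by decide
        have h13 : Nat.testBit 13 7 = false := by decide
        cases hb : d.testBit n <;> cases h6 : l.testBit 6 <;>
          simp [hb, h6, g4, g5, h141, h13, show j ≥ 7 by omega, show j ≥ n+1 by omega,
            show j ≥ n by omega]
      · -- j > n + 7 : above every operand's bits
        have a1 : d.testBit (j-7) = false := pvHigh d _ (n+1) hd (by omega)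
        have a2 : l.testBit (j-(n+1)) = false := pvHigh l _ 7 hl (by omega)
        have a3 : Nat.testBit 141 (j-n) = false := pvHigh 141 _ 8 (by norm_num) (by omega)
        have a4 : Nat.testBit 13 (j-n) = false := pvHigh 13 _ 4 (by norm_num) (by omega)
        have a5 : (d % 2 ^ n).testBit (j-7) = false := by
          apply pvHigh _ _ n _ (by omega); exact Nat.mod_lt _ (by positivity)
        have g : ¬ (j - n < 7) := by omega
        simp [a1, a2, a3, a4, a5, g]

lemma pvKey (n d l : Nat) (hd : d < 2 ^ (n+1)) (hl : l < 128) :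
    (if ((d <<< 7) ^^^ (l <<< (n+1))).testBit (n+7)
      then ((d <<< 7) ^^^ (l <<< (n+1))) ^^^ (141 <<< n)
      else ((d <<< 7) ^^^ (l <<< (n+1))))
    = ((d % 2 ^ n) <<< 7) ^^^ ((pvStep l (d.testBit n)) <<< n) := by
  have hbit : ((d <<< 7) ^^^ (l <<< (n+1))).testBit (n+7) = (d.testBit n).xor (l.testBit 6) := by
    simp [Nat.testBit_xor, Nat.testBit_shiftLeft, show n+7-7 = n by omega,
      show n+7-(n+1) = 6 by omega, show n+7 ≥ n+1 by omega]
  rw [hbit]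
  unfold pvStep
  cases hf : (d.testBit n).xor (l.testBit 6)
  · simpa [hf] using pvKeyAux n d l false hd hl hf.symm
  · simpa [hf] using pvKeyAux n d l true hd hl hf.symm

-- the division run equals the LFSR run (main invariant)
lemma pvInv : ∀ (n d l : Nat), d < 2 ^ n → l < 128 →
    pvRunB n ((d <<< 7) ^^^ (l <<< n)) = pvRunA n d l := by
  intro n
  induction n with
  | zero =>
    intro d l hd _
    interval_cases d
    simp [pvRunB, pvRunA]
  | succ n ih =>
    intro d l hd hl
    show pvRunB n (if ((d <<< 7) ^^^ (l <<< (n+1))).testBit (n+7)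
        then ((d <<< 7) ^^^ (l <<< (n+1))) ^^^ (141 <<< n)
        else ((d <<< 7) ^^^ (l <<< (n+1))))
      = pvRunA n d (pvStep l (d.testBit n))
    rw [pvKey n d l hd hl,
        ih (d % 2 ^ n) _ (Nat.mod_lt _ (by positivity)) (pvStep_lt l _ hl)]
    exact pvRunA_mod n d _

lemma pvStepA_cast (d l k : Nat) :
    pvStepA (d : Int) (l : Int) (k : Int) = ((pvStep l (d.testBit k) : Nat) : Int) := by
  unfold pvStepA pvStep
  have c1 : ((d : Int) >>> ((k : Int)).toNat) = ((d >>> k : Nat) : Int) := by simp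
  have c2 : ((l : Int) >>> (7 - 1 : Nat)) = ((l >>> 6 : Nat) : Int) := by simp
  have c3 : ((l : Int) <<< (1 : Nat)) = ((l <<< 1 : Nat) : Int) := by simp
  simp only [c1, c2, c3]
  have b1 : PySem.Int.band ((d >>> k : Nat) : Int) 1 = (((d >>> k) &&& 1 : Nat) : Int) := by
    exact_mod_cast PySem.Int.band_natCast _ 1
  have b2 : PySem.Int.band ((l >>> 6 : Nat) : Int) 1 = (((l >>> 6) &&& 1 : Nat) : Int) := by
    exact_mod_cast PySem.Int.band_natCast _ 1
  have b3 : PySem.Int.band ((l <<< 1 : Nat) : Int) ((1 <<< (7:Nat)) - 1) = ((2 * l % 128 : Nat) : Int) := by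
    rw [← pvMask l]
    exact_mod_cast PySem.Int.band_natCast (l <<< 1) 127
  simp only [b1, b2, b3, pvBitAndOne]
  cases hb : d.testBit k <;> cases h6 : l.testBit 6 <;>
    simp <;> exact_mod_cast (PySem.Int.bxor_natCast _ 13)

lemma pvStepB_cast (nv k : Nat) :
    pvStepB (nv : Int) ((k : Int) + 7)
      = ((if nv.testBit (k+7) then nv ^^^ (141 <<< k) else nv : Nat) : Int) := by
  unfold pvStepB
  have h1 : (((k : Int) + 7)).toNat = k + 7 := by omega
  have h2 : (((k : Int) + 7) - 7).toNat = k := by omega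
  rw [h1, h2]
  have c1 : ((nv : Int) >>> (k + 7)) = ((nv >>> (k+7) : Nat) : Int) := by simp
  have b1 : PySem.Int.band ((nv >>> (k+7) : Nat) : Int) 1 = (((nv >>> (k+7)) &&& 1 : Nat) : Int) := by
    exact_mod_cast PySem.Int.band_natCast _ 1
  rw [c1, b1, pvBitAndOne]
  cases hb : nv.testBit (k+7)
  · simp
  · simp
    exact_mod_cast PySem.Int.bxor_natCast nv (141 <<< k)

lemma pvFoldA : ∀ (n : Nat) (d l : Nat),
    ((List.range n).reverse.map (fun (k : Nat) => (k : Int))).foldl (pvStepA (d : Int)) (l : Int)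
      = ((pvRunA n d l : Nat) : Int) := by
  intro n
  induction n with
  | zero => intro d l; rfl
  | succ n ih =>
    intro d l
    have hrev : (List.range (n+1)).reverse = n :: (List.range n).reverse := by
      simp [List.range_succ]
    rw [hrev, List.map_cons, List.foldl_cons, pvStepA_cast]
    exact ih d _

lemma pvFoldB : ∀ (n : Nat) (nv : Nat),
    ((List.range n).reverse.map (fun (k : Nat) => ((k : Int) + 7))).foldl pvStepB (nv : Int)
      = ((pvRunB n nv : Nat) : Int) := by
  intro n
  induction n with
  | zero => intro nv; rfl
  | succ n ih =>
    intro nv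
    have hrev : (List.range (n+1)).reverse = n :: (List.range n).reverse := by
      simp [List.range_succ]
    rw [hrev, List.map_cons, List.foldl_cons, pvStepB_cast]
    exact ih _

lemma pvRangeA : PySem.List.pyRange 23 (-1) (-1) = (List.range 24).reverse.map (fun (k : Nat) => (k : Int)) := by
  decide

lemma pvRangeB : PySem.List.pyRange 30 6 (-1) = (List.range 24).reverse.map (fun (k : Nat) => ((k : Int) + 7)) := by
  decide

lemma pvBand255 (a : Int) : ∃ m : Nat, m < 256 ∧ PySem.Int.band a 255 = (m : Int) := by
  by_cases h : 0 ≤ a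
  · refine ⟨a.toNat &&& 255, ?_, ?_⟩
    · have := Nat.and_le_right (n := a.toNat) (m := 255)
      omega
    · simp [PySem.Int.band, h]
  · refine ⟨255 - (255 &&& (-a - 1).toNat), by omega, ?_⟩
    simp [PySem.Int.band, h]

-- ===== VERDICT (by name: the statement is the Claim_ definition above) =====
theorem calculate_bch_ecc_spec : Claim_equal_calculate_bch_ecc := by
  unfold Claim_equal_calculate_bch_ecc Spec_calculate_bch_ecc
  intro hb0 hb1 hb2 _
  obtain ⟨a0, ha0, e0⟩ := pvBand255 hb0
  obtain ⟨a1, ha1, e1⟩ := pvBand255 hb1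
  obtain ⟨a2, ha2, e2⟩ := pvBand255 hb2
  simp only [calculate_bch_ecc, calculate_bch_ecc_alt, e0, e1, e2]
  have hsh0 : ((a0:Int) <<< (16:Nat)) = ((a0 <<< 16 : Nat) : Int) := (Int.natCast_shiftLeft _ _).symm
  have hsh1 : ((a1:Int) <<< (8:Nat)) = ((a1 <<< 8 : Nat) : Int) := (Int.natCast_shiftLeft _ _).symm
  rw [hsh0, hsh1, PySem.Int.bor_natCast, PySem.Int.bor_natCast]
  set D : Nat := ((a0 <<< 16) ||| (a1 <<< 8)) ||| a2 with hD
  have hDlt : D < 2 ^ 24 := by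
    apply Nat.or_lt_two_pow
    · apply Nat.or_lt_two_pow
      · rw [Nat.shiftLeft_eq]; norm_num; omega
      · rw [Nat.shiftLeft_eq]; norm_num; omega
    · norm_num; omega
  have hsh7 : (((D : Nat) : Int) <<< (7:Nat)) = ((D <<< 7 : Nat) : Int) := (Int.natCast_shiftLeft _ _).symm
  rw [pvRangeA, pvRangeB, hsh7]
  rw [show (0 : Int) = ((0 : Nat) : Int) from rfl]
  rw [pvFoldA 24 D 0, pvFoldB 24 (D <<< 7)]
  have m1 : PySem.Int.band ((pvRunA 24 D 0 : Nat) : Int) 127 = (((pvRunA 24 D 0) &&& 127 : Nat) : Int) := by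
    exact_mod_cast PySem.Int.band_natCast _ 127
  have m2 : PySem.Int.band ((pvRunB 24 (D <<< 7) : Nat) : Int) 127 = (((pvRunB 24 (D <<< 7)) &&& 127 : Nat) : Int) := by
    exact_mod_cast PySem.Int.band_natCast _ 127
  rw [m1, m2]
  have hi := pvInv 24 D 0 hDlt (by norm_num)
  simp only [Nat.zero_shiftLeft, Nat.xor_zero] at hi
  rw [hi]
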